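-- pv_equiv track=rewrite | github.com/simonplmak-cloud/hkex-filing-scraper | src/hkex_scraper/extractor.py | _strip_md_tables
-- ===== SOURCE A (Python) =====
-- from typing import List, Tuple
--
-- def _strip_md_tables(md_text: str) -> Tuple[str, List[int]]:
--     """Remove all Markdown tables from text, returning cleaned text and
--     the character positions where tables were removed (for reinsertion).
--
--     A Markdown table is a consecutive block of lines starting with '|',
--     with at least 3 lines (header + separator + data).
--     """
--     lines = md_text.split("\n")
--     result_lines: List[str] = []
--     positions: List[int] = []  # char offset in result where each table was
--     i = 0
--     char_offset = 0
--
--     while i < len(lines):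
--         if lines[i].strip().startswith("|"):
--             # Collect the full table block
--             table_start = i
--             while i < len(lines) and lines[i].strip().startswith("|"):
--                 i += 1
--             table_len = i - table_start
--             if table_len >= 3:
--                 # This is a real table — record position and skip it
--                 positions.append(char_offset)
--                 # Add a placeholder blank line
--                 result_lines.append("")
--                 char_offset += 1  # for the newline
--             else:
--                 # Too short to be a table — keep the lines
--                 for j in range(table_start, i):
--                     result_lines.append(lines[j])
--                     char_offset += len(lines[j]) + 1
--         else:
--             result_lines.append(lines[i])
--             char_offset += len(lines[i]) + 1
--             i += 1
--
--     return "\n".join(result_lines), positions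
-- ===== SOURCE B (Python) =====
-- from typing import List, Tuple
--
-- def _strip_md_tables(md_text: str) -> Tuple[str, List[int]]:
--     # Staged array passes: classify every line independently via precomputed
--     # run-length arrays, instead of scanning/grouping runs with an inner loop.
--     lines = md_text.split("\n")
--     pipe = [l.strip().startswith("|") for l in lines]
--     # run_len[i]: length of the maximal run of pipe-lines starting at i (0 if not a pipe-line)
--     run_len = []
--     nxt = 0
--     for p in reversed(pipe):
--         nxt = nxt + 1 if p else 0
--         run_len.append(nxt)
--     run_len.reverse()
--     # tot[i]: length of the maximal pipe-run containing i (0 if not a pipe-line)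
--     tot = []
--     prev_p, prev_t = False, 0
--     for p, rl in zip(pipe, run_len):
--         t = (prev_t if prev_p else rl) if p else 0
--         tot.append(t)
--         prev_p, prev_t = p, t
--     # emit: a line is dropped iff it lies in a pipe-run of total length >= 3;
--     # the first line of such a run contributes the placeholder and the position
--     result_lines: List[str] = []
--     positions: List[int] = []
--     off = 0
--     prev = False
--     for l, p, t in zip(lines, pipe, tot):
--         if p and t >= 3:
--             if not prev:
--                 positions.append(off)
--                 result_lines.append("")
--                 off += 1
--         else:
--             result_lines.append(l)
--             off += len(l) + 1
--         prev = p
--     return "\n".join(result_lines), positions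
-- ===== Notes on version B (the rewrite author's own statement) =====
-- stated objective: alternative
-- what changed: Replaces A's run-skipping index loop (inner while collecting each table block) by staged array passes: a per-line pipe flag array, a backward run-length array, a forward run-total array, and one emit pass that classifies every line independently (a line is dropped iff its run-total is >= 3, the run's first line yields the placeholder).
import Mathlib
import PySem

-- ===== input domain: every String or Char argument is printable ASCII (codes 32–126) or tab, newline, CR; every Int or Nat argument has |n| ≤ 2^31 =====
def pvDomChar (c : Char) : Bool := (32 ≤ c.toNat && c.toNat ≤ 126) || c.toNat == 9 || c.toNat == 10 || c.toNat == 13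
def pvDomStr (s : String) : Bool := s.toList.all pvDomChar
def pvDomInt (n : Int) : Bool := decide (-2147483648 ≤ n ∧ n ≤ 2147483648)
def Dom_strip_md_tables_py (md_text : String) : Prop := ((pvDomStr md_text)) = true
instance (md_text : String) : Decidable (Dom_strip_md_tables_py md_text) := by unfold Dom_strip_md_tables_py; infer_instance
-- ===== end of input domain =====

-- B replaces A's run-skipping index loop by staged array passes: a per-line pipe
-- classification, a backward run-length array, a forward run-total array, and one
-- emit pass that decides each line independently (objective: alternative; same O(n) cost).


-- line.strip().startswith("|")
def pvPipe (l : String) : Bool := PySem.Str.startswith (PySem.Str.strip l) "|"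

-- ===== PORT A =====
-- A's inner 'while i < len(lines) and lines[i].strip().startswith("|")': collect the
-- pipe-prefix of the remaining lines and return (collected lines, remainder).
def pvCollect : List String → List String × List String
  | [] => ([], [])
  | l :: rest =>
    if pvPipe l then
      let p := pvCollect rest
      (l :: p.1, p.2)
    else ([], l :: rest)

theorem pvCollect_snd_le (xs : List String) : (pvCollect xs).2.length ≤ xs.length := by
  induction xs with
  | nil => simp [pvCollect]
  | cons l rest ih =>
    by_cases h : pvPipe l <;> simp [pvCollect, h] <;> omega

-- A's outer while loop, state (remaining lines, result_lines, positions, char_offset)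
def pvStripAGo : List String → List String → List Int → Int → List String × List Int
  | [], res, pos, _ => (res, pos)
  | l :: rest, res, pos, off =>
    if pvPipe l then
      let p := pvCollect rest
      let run := l :: p.1
      if 3 ≤ run.length then
        pvStripAGo p.2 (res ++ [""]) (pos ++ [off]) (off + 1)
      else
        pvStripAGo p.2 (res ++ run) pos
          (run.foldl (fun a s => a + (PySem.Str.len s : Int) + 1) off)
    else
      pvStripAGo rest (res ++ [l]) pos (off + (PySem.Str.len l : Int) + 1)
termination_by lines => lines.length
decreasing_by
  · have := pvCollect_snd_le rest; simp; omega
  · have := pvCollect_snd_le rest; simp; omega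
  · simp

def strip_md_tables_py (md_text : String) : String × List Int :=
  let r := pvStripAGo ((PySem.Str.split? md_text "\n").getD []) [] [] 0
  (PySem.Str.join "\n" r.1, r.2)

-- ===== PORT B =====
-- Source B's backward pass building run_len then reversing it: the same array produced by
-- a structural right-to-left recursion (run_len[i] = length of the pipe-run starting at i).
def pvRunLen : List Bool → List Nat
  | [] => []
  | p :: ps =>
    let r := pvRunLen ps
    (if p then r.headD 0 + 1 else 0) :: r

-- Source B's 'for p, rl in zip(pipe, run_len)' with carried (prev_p, prev_t)
def pvTot : List Bool → List Nat → Bool → Nat → List Nat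
  | p :: ps, rl :: rls, prevP, prevT =>
    let t := if p then (if prevP then prevT else rl) else 0
    t :: pvTot ps rls p t
  | _, _, _, _ => []

-- Source B's final 'for l, p, t in zip(lines, pipe, tot)' with carried prev; state
-- (result_lines, positions, off)
def pvEmit : List String → List Bool → List Nat → Bool → List String → List Int → Int →
    List String × List Int
  | l :: ls, p :: ps, t :: ts, prev, res, pos, off =>
    if p && decide (3 ≤ t) then
      if !prev then pvEmit ls ps ts p (res ++ [""]) (pos ++ [off]) (off + 1)
      else pvEmit ls ps ts p res pos off
    else pvEmit ls ps ts p (res ++ [l]) pos (off + (PySem.Str.len l : Int) + 1)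
  | _, _, _, _, res, pos, _ => (res, pos)

def strip_md_tables_py_alt (md_text : String) : String × List Int :=
  let lines := (PySem.Str.split? md_text "\n").getD []
  let pipe := lines.map pvPipe
  let runLen := pvRunLen pipe
  let tot := pvTot pipe runLen false 0
  let r := pvEmit lines pipe tot false [] [] 0
  (PySem.Str.join "\n" r.1, r.2)

-- ===== PRECONDITION & SPEC =====
def Spec_strip_md_tables_py (md_text : String) (out : String × List Int) : Prop := out = strip_md_tables_py_alt md_text
instance (md_text : String) (out : String × List Int) : Decidable (Spec_strip_md_tables_py md_text out) := by unfold Spec_strip_md_tables_py; infer_instance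

-- ===== CLAIM (what is proved, stated in full; the proofs are below) =====
def Claim_equal_strip_md_tables_py : Prop := ∀ (md_text : String), Dom_strip_md_tables_py md_text → Spec_strip_md_tables_py md_text (strip_md_tables_py md_text)

-- ===== LEMMAS AND PROOFS =====

theorem pvCollect_eq (xs : List String) :
    pvCollect xs = (xs.takeWhile pvPipe, xs.dropWhile pvPipe) := by
  induction xs with
  | nil => simp [pvCollect]
  | cons l rest ih =>
    by_cases h : pvPipe l <;> simp [pvCollect, h, ih]

-- head of pvRunLen is 0 when the pipe list is empty or starts with false
theorem pvRunLen_headD (ps : List Bool) (h : ps = [] ∨ ps.head? = some false) :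
    (pvRunLen ps).headD 0 = 0 := by
  rcases ps with _ | ⟨p, ps⟩
  · rfl
  · rcases h with h | h
    · simp at h
    · simp at h; simp [pvRunLen, h]

-- descending list k, k-1, …, 1
def pvDesc : Nat → List Nat
  | 0 => []
  | k + 1 => (k + 1) :: pvDesc k

theorem pvDesc_length (k : Nat) : (pvDesc k).length = k := by
  induction k with
  | zero => rfl
  | succ k ih => simp [pvDesc, ih]

theorem pvRunLen_run (k : Nat) (dp : List Bool) (h : dp = [] ∨ dp.head? = some false) :
    pvRunLen (List.replicate k true ++ dp) = pvDesc k ++ pvRunLen dp := by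
  induction k with
  | zero => simp [pvDesc]
  | succ k ih =>
    simp only [List.replicate_succ, List.cons_append, pvRunLen, ih, pvDesc]
    congr 1
    rcases k with _ | k
    · simp only [pvDesc, List.nil_append]
      simpa using pvRunLen_headD dp h
    · simp [pvDesc]

-- pvTot is insensitive to the carry when the next line is not a pipe-line
theorem pvTot_carry (ps : List Bool) (rls : List Nat) (t : Nat)
    (h : ps = [] ∨ ps.head? = some false) :
    pvTot ps rls true t = pvTot ps rls false 0 := by
  rcases ps with _ | ⟨p, ps⟩
  · rfl
  · rcases h with h | h
    · simp at h
    · simp at h; subst h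
      rcases rls with _ | ⟨rl, rls⟩
      · rfl
      · simp [pvTot]

-- inside a pipe-run after the first line, tot repeats the carried total
theorem pvTot_within (k : Nat) (rls : List Nat) (tl : List Bool) (tls : List Nat) (t : Nat)
    (hk : rls.length = k) :
    pvTot (List.replicate k true ++ tl) (rls ++ tls) true t
      = List.replicate k t ++ pvTot tl tls true t := by
  induction k generalizing rls with
  | zero => simp_all
  | succ k ih =>
    rcases rls with _ | ⟨rl, rls⟩
    · simp at hk
    · simp at hk
      simp [List.replicate_succ, pvTot, ih rls hk]

-- a whole pipe-run: tot is constantly the run length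
theorem pvTot_run (k : Nat) (tl : List Bool) (tls : List Nat) (hk : 1 ≤ k) :
    pvTot (List.replicate k true ++ tl) (pvDesc k ++ tls) false 0
      = List.replicate k k ++ pvTot tl tls true k := by
  rcases k with _ | k
  · omega
  · simp only [List.replicate_succ, pvDesc, List.cons_append, pvTot]
    simp [pvTot_within k (pvDesc k) tl tls (k + 1) (pvDesc_length k)]

-- pvEmit is insensitive to the carry when the next line is not a pipe-line
theorem pvEmit_carry (ls : List String) (ps : List Bool) (ts : List Nat)
    (res : List String) (pos : List Int) (off : Int)
    (h : ps = [] ∨ ps.head? = some false) :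
    pvEmit ls ps ts true res pos off = pvEmit ls ps ts false res pos off := by
  rcases ps with _ | ⟨p, ps⟩
  · rcases ls with _ | ⟨l, ls⟩ <;> rfl
  · rcases h with h | h
    · simp at h
    · simp at h; subst h
      rcases ls with _ | ⟨l, ls⟩
      · rfl
      · rcases ts with _ | ⟨t, ts⟩
        · rfl
        · simp [pvEmit]

-- a dropped table run after its first line: every further line is skipped
theorem pvEmit_skip (k : Nat) (ls : List String) (tl : List String) (tls : List Bool)
    (tts : List Nat) (t : Nat) (res : List String) (pos : List Int) (off : Int)
    (hk : ls.length = k) (ht : 3 ≤ t) :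
    pvEmit (ls ++ tl) (List.replicate k true ++ tls) (List.replicate k t ++ tts)
        true res pos off
      = pvEmit tl tls tts true res pos off := by
  induction k generalizing ls with
  | zero => simp_all
  | succ k ih =>
    rcases ls with _ | ⟨l, ls⟩
    · simp at hk
    · simp at hk
      simp [List.replicate_succ, pvEmit, ht, ih ls hk]

-- a short pipe-run (tot < 3): every line is emitted, carry ends true for a nonempty run
theorem pvEmit_keep (ls : List String) (tl : List String) (tls : List Bool)
    (tts : List Nat) (t : Nat) (res : List String) (pos : List Int) (off : Int)
    (prev : Bool) (ht : t < 3) :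
    pvEmit (ls ++ tl) (List.replicate ls.length true ++ tls)
        (List.replicate ls.length t ++ tts) prev res pos off
      = pvEmit tl tls tts (if ls = [] then prev else true) (res ++ ls) pos
          (ls.foldl (fun a s => a + (PySem.Str.len s : Int) + 1) off) := by
  induction ls generalizing prev res off with
  | nil => simp
  | cons l ls ih =>
    have hcond : ¬ (3 ≤ t) := by omega
    simp only [List.length_cons, List.replicate_succ, List.cons_append, pvEmit,
      hcond, decide_false, Bool.and_false, Bool.false_eq_true, if_false]
    rw [ih]
    simp [List.foldl_cons]

-- pipe map of a run of pipe-lines is a replicate of true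
theorem pvMap_replicate_true (ls : List String) (h : ∀ x ∈ ls, pvPipe x = true) :
    ls.map pvPipe = List.replicate ls.length true := by
  induction ls with
  | nil => rfl
  | cons l ls ih =>
    simp [List.replicate_succ, h l (by simp), ih (fun x hx => h x (by simp [hx]))]

-- one pvEmit step on the first line of a dropped table
theorem pvEmit_step_table (l : String) (ls : List String) (ps : List Bool) (ts : List Nat)
    (t : Nat) (ht : 3 ≤ t) (res : List String) (pos : List Int) (off : Int) :
    pvEmit (l :: ls) (true :: ps) (t :: ts) false res pos off
      = pvEmit ls ps ts true (res ++ [""]) (pos ++ [off]) (off + 1) := by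
  simp [pvEmit, ht]

-- main loop equivalence: A's run-skipping loop = B's emit pass over the tot array
theorem pvMain : ∀ (n : Nat) (lines : List String), lines.length ≤ n →
    ∀ res pos off,
      pvStripAGo lines res pos off
        = pvEmit lines (lines.map pvPipe)
            (pvTot (lines.map pvPipe) (pvRunLen (lines.map pvPipe)) false 0)
            false res pos off := by
  intro n
  induction n with
  | zero =>
    intro lines hl res pos off
    have : lines = [] := List.eq_nil_of_length_eq_zero (Nat.le_zero.mp hl)
    subst this; simp [pvStripAGo, pvEmit]
  | succ n ih =>
    intro lines hl res pos off
    match lines with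
    | [] => simp [pvStripAGo, pvEmit]
    | l :: rest =>
      by_cases hp : pvPipe l
      · -- a pipe-run: split rest into the run tail tw and the remainder dw
        have hAcol := pvCollect_eq rest
        set tw := rest.takeWhile pvPipe with htw
        set dw := rest.dropWhile pvPipe with hdw
        have hsplit : rest = tw ++ dw := (List.takeWhile_append_dropWhile).symm
        have hrun : ∀ x ∈ l :: tw, pvPipe x = true := by
          intro x hx
          rcases List.mem_cons.mp hx with h | h
          · subst h; exact hp
          · exact List.mem_takeWhile_imp h
        have hdwh : dw.map pvPipe = [] ∨ (dw.map pvPipe).head? = some false := by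
          rcases hdwe : dw with _ | ⟨x, xs⟩
          · left; rfl
          · right
            have := List.head?_dropWhile_not pvPipe rest
            rw [← hdw] at this; rw [hdwe] at this
            simp at this ⊢
            simpa using this
        have hmap : (l :: rest).map pvPipe
            = List.replicate (l :: tw).length true ++ dw.map pvPipe := by
          conv_lhs => rw [show l :: rest = (l :: tw) ++ dw by rw [hsplit]; rfl]
          rw [List.map_append, pvMap_replicate_true _ hrun]
        have htt : pvTot ((l :: rest).map pvPipe) (pvRunLen ((l :: rest).map pvPipe)) false 0
            = List.replicate (l :: tw).length (l :: tw).length ++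
                pvTot (dw.map pvPipe) (pvRunLen (dw.map pvPipe)) false 0 := by
          rw [hmap, pvRunLen_run _ _ hdwh, pvTot_run _ _ _ (by simp), pvTot_carry _ _ _ hdwh]
        have hdwlen : dw.length ≤ n := by
          have := List.length_dropWhile_le pvPipe rest
          rw [← hdw] at this; simp at hl; omega
        rw [htt, hmap]
        rw [show (l :: rest) = (l :: tw) ++ dw from by rw [hsplit]; rfl]
        by_cases h3 : 3 ≤ (l :: tw).length
        · -- a real table: A skips the run; B makes the placeholder then skips the rest
          rw [show ((l :: tw) ++ dw : List String) = l :: (tw ++ dw) from rfl]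
          rw [show List.replicate (l :: tw).length true = true :: List.replicate tw.length true
                from by simp [List.replicate_succ],
              show List.replicate (l :: tw).length (l :: tw).length
                  = (l :: tw).length :: List.replicate tw.length (l :: tw).length
                from by simp [List.replicate_succ]]
          simp only [List.cons_append]
          rw [pvEmit_step_table _ _ _ _ _ h3,
              pvEmit_skip tw.length tw dw _ _ _ _ _ _ rfl h3,
              pvEmit_carry _ _ _ _ _ _ hdwh,
              ← ih dw hdwlen]
          -- A side
          have hAcol' : pvCollect (tw ++ dw) = (tw, dw) := by rw [← hsplit]; exact hAcol
          simp only [pvStripAGo, hp, if_true, hAcol']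
          rw [if_pos h3]
        · -- a short run: both keep the lines
          have hlt : (l :: tw).length < 3 := by omega
          rw [pvEmit_keep (l :: tw) dw _ _ _ _ _ _ false hlt]
          rw [if_neg (by simp : ¬(l :: tw = [])), pvEmit_carry _ _ _ _ _ _ hdwh, ← ih dw hdwlen]
          -- A side
          have hAcol' : pvCollect (tw ++ dw) = (tw, dw) := by rw [← hsplit]; exact hAcol
          rw [List.cons_append]
          simp only [pvStripAGo, hp, if_true, hAcol']
          rw [if_neg h3]
      · -- a non-pipe line: both sides peel one line and return to the initial state
        have hpf : pvPipe l = false := Bool.not_eq_true _ |>.mp hp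
        simp only [pvStripAGo, hpf, Bool.false_eq_true, if_false]
        rw [ih rest (by simp at hl; omega) (res ++ [l]) pos (off + (PySem.Str.len l : Int) + 1)]
        simp [pvRunLen, pvTot, pvEmit, hpf]

-- ===== VERDICT (by name: the statement is the Claim_ definition above) =====
theorem strip_md_tables_py_spec : Claim_equal_strip_md_tables_py := by
  intro md _
  unfold Spec_strip_md_tables_py strip_md_tables_py strip_md_tables_py_alt
  rw [pvMain ((PySem.Str.split? md "\n").getD []).length ((PySem.Str.split? md "\n").getD []) le_rfl [] [] 0]
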